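-- pv_equiv track=rewrite | github.com/sloremart/NEURODXBACK | controlfacturacion/views.py | filter_duplicate_citas
-- ===== SOURCE A (Python) =====
-- def filter_duplicate_citas(citas):
--     unique_citas = []
--     duplicate_citas = []
--     seen = set()
--     for cita in citas:
--         key = (cita['IdCita'], cita['CUPS'])
--         if key not in seen:
--             seen.add(key)
--             unique_citas.append(cita)
--         else:
--             duplicate_citas.append(cita)
--     return unique_citas, duplicate_citas
-- ===== SOURCE B (Python) =====
-- def filter_duplicate_citas(citas):
--     citas = list(citas)
--     first_index = {}
--     for i, cita in enumerate(citas):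
--         key = (cita['IdCita'], cita['CUPS'])
--         if key not in first_index:
--             first_index[key] = i
--     unique_citas = []
--     duplicate_citas = []
--     for i, cita in enumerate(citas):
--         if first_index[(cita['IdCita'], cita['CUPS'])] == i:
--             unique_citas.append(cita)
--         else:
--             duplicate_citas.append(cita)
--     return unique_citas, duplicate_citas
-- ===== Notes on version B (the rewrite author's own statement) =====
-- stated objective: alternative
-- what changed: Replaces the single-pass seen-set partition by a two-pass scheme: first build a dict mapping each (IdCita, CUPS) key to the index of its first occurrence, then classify each cita by whether its index equals that first-occurrence index.
import Mathlib
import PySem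

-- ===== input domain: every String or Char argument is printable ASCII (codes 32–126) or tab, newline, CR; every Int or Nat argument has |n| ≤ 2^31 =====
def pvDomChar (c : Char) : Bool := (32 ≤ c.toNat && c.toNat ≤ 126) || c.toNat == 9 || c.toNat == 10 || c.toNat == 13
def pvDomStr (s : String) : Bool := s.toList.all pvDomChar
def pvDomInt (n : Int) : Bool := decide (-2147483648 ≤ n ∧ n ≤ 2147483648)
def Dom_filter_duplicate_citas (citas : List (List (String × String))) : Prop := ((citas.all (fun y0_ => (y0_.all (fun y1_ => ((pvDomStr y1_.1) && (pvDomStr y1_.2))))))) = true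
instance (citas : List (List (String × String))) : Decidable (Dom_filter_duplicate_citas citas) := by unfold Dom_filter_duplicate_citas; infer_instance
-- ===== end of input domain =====

-- B replaces A's single-pass seen-set partition by two passes: build a first-occurrence
-- index dict for key (IdCita, CUPS), then classify each cita by comparing its index
-- with the stored first-occurrence index (alternative decomposition, same cost).


-- key = (cita['IdCita'], cita['CUPS']); both components are `some` on all inputs admitted by Pre_
def pvKey (cita : List (String × String)) : Option String × Option String :=
  (PySem.Dict.get? (PySem.Dict.mk cita) "IdCita", PySem.Dict.get? (PySem.Dict.mk cita) "CUPS")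

-- ===== PORT A =====
-- loop body of A: if key not in seen: seen.add(key); unique.append(cita) else duplicate.append(cita)
def pvStepA (st : List (List (String × String)) × List (List (String × String)) × PySem.Set (Option String × Option String))
    (cita : List (String × String)) :
    List (List (String × String)) × List (List (String × String)) × PySem.Set (Option String × Option String) :=
  if ¬ (pvKey cita ∈ st.2.2) then (st.1 ++ [cita], st.2.1, PySem.Set.add st.2.2 (pvKey cita))
  else (st.1, st.2.1 ++ [cita], st.2.2)

def filter_duplicate_citas (citas : List (List (String × String))) :
    (List (List (String × String))) × (List (List (String × String))) :=
  let r := citas.foldl pvStepA ([], [], PySem.Set.empty)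
  (r.1, r.2.1)

-- ===== PORT B =====
-- first pass of B: if key not in first_index: first_index[key] = i
def pvStepB1 (d : PySem.Dict (Option String × Option String) Int) (p : Int × List (String × String)) :
    PySem.Dict (Option String × Option String) Int :=
  if PySem.Dict.contains d (pvKey p.2) = false then PySem.Dict.insert d (pvKey p.2) p.1 else d

-- second pass of B: unique iff first_index[key] == i
def pvStepB2 (first : PySem.Dict (Option String × Option String) Int)
    (st : List (List (String × String)) × List (List (String × String))) (p : Int × List (String × String)) :
    List (List (String × String)) × List (List (String × String)) :=
  if PySem.Dict.get? first (pvKey p.2) = some p.1 then (st.1 ++ [p.2], st.2) else (st.1, st.2 ++ [p.2])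

def filter_duplicate_citas_alt (citas : List (List (String × String))) :
    (List (List (String × String))) × (List (List (String × String))) :=
  let first := (PySem.List.enumerate citas).foldl pvStepB1 PySem.Dict.empty
  (PySem.List.enumerate citas).foldl (pvStepB2 first) ([], [])

-- ===== PRECONDITION & SPEC =====
-- Pre_ excludes exactly the inputs containing a cita without an 'IdCita' or 'CUPS' entry,
-- on which the Python A raises KeyError (B raises there too).
def Pre_filter_duplicate_citas (citas : List (List (String × String))) : Prop :=
  ∀ cita ∈ citas, (PySem.Dict.get? (PySem.Dict.mk cita) "IdCita").isSome = true ∧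
    (PySem.Dict.get? (PySem.Dict.mk cita) "CUPS").isSome = true
instance (citas : List (List (String × String))) : Decidable (Pre_filter_duplicate_citas citas) := by
  unfold Pre_filter_duplicate_citas; infer_instance

def pvWitness_filter_duplicate_citas : (List (List (String × String))) :=
  [[("IdCita", "1"), ("CUPS", "A")], [("IdCita", "1"), ("CUPS", "A")]]

def Spec_filter_duplicate_citas (citas : List (List (String × String)))
    (out : (List (List (String × String))) × (List (List (String × String)))) : Prop :=
  out = filter_duplicate_citas_alt citas
instance (citas : List (List (String × String))) (out : (List (List (String × String))) × (List (List (String × String)))) : Decidable (Spec_filter_duplicate_citas citas out) := by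
  unfold Spec_filter_duplicate_citas; infer_instance

-- ===== CLAIM (what is proved, stated in full; the proofs are below) =====
def Claim_equal_filter_duplicate_citas : Prop := ∀ (citas : List (List (String × String))), Dom_filter_duplicate_citas citas → Pre_filter_duplicate_citas citas → Spec_filter_duplicate_citas citas (filter_duplicate_citas citas)

-- ===== LEMMAS AND PROOFS =====

-- first-occurrence index of a key in a list of citas
def pvFIdx (l : List (List (String × String))) (k : Option String × Option String) : Option Nat :=
  List.findIdx? (fun c => decide (pvKey c = k)) l

lemma pvFIdx_lt_length {l : List (List (String × String))} {k : Option String × Option String} {m : Nat}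
    (h : pvFIdx l k = some m) : m < l.length :=
  (List.findIdx?_eq_some_iff_findIdx_eq.mp h).1

lemma pvFIdx_cons (c : List (String × String)) (t : List (List (String × String)))
    (k : Option String × Option String) :
    pvFIdx (c :: t) k = if pvKey c = k then some 0 else (pvFIdx t k).map (· + 1) := by
  simp [pvFIdx, List.findIdx?_cons]

lemma pvFIdx_append (pre l : List (List (String × String))) (k : Option String × Option String) :
    pvFIdx (pre ++ l) k = (pvFIdx pre k).or ((pvFIdx l k).map (· + pre.length)) := by
  simp [pvFIdx, List.findIdx?_append]

-- pass 1 builds the first-occurrence dict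
lemma pvBuild_get (l : List (List (String × String))) (n : Int)
    (d : PySem.Dict (Option String × Option String) Int) (k : Option String × Option String) :
    ((PySem.List.enumerate l n).foldl pvStepB1 d).get? k
      = (d.get? k).or ((pvFIdx l k).map (fun m => n + (m : Int))) := by
  induction l generalizing n d with
  | nil => simp [PySem.List.enumerate_nil, pvFIdx]
  | cons c t ih =>
    rw [PySem.List.enumerate_cons, List.foldl_cons]
    by_cases hc : PySem.Dict.contains d (pvKey c) = false
    · have hstep : pvStepB1 d (n, c) = PySem.Dict.insert d (pvKey c) n := by simp [pvStepB1, hc]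
      rw [hstep, ih]
      by_cases hk : k = pvKey c
      · subst hk
        have hd : d.get? (pvKey c) = none := (PySem.Dict.get?_eq_none_iff_contains d _).mpr hc
        rw [PySem.Dict.get?_insert_self, hd, pvFIdx_cons, if_pos rfl]
        simp
      · rw [PySem.Dict.get?_insert, if_neg hk, pvFIdx_cons]
        have hne : ¬ (pvKey c = k) := fun h => hk h.symm
        rw [if_neg hne]
        cases hd : d.get? k with
        | some v => simp
        | none =>
          cases hft : pvFIdx t k with
          | none => simp
          | some m =>
            simp
            omega
    · have hstep : pvStepB1 d (n, c) = d := by simp [pvStepB1, hc]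
      rw [hstep, ih, pvFIdx_cons]
      by_cases hk : pvKey c = k
      · rw [if_pos hk]
        have hsome : (d.get? k).isSome = true := by
          rw [← PySem.Dict.contains_eq_isSome_get?, ← hk]
          simpa using hc
        obtain ⟨v, hv⟩ := Option.isSome_iff_exists.mp hsome
        simp [hv]
      · rw [if_neg hk]
        cases hd : d.get? k with
        | some v => simp
        | none =>
          cases hft : pvFIdx t k with
          | none => simp
          | some m =>
            simp
            omega

lemma pvFirst_get (citas : List (List (String × String))) (k : Option String × Option String) :
    ((PySem.List.enumerate citas).foldl pvStepB1 PySem.Dict.empty).get? k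
      = (pvFIdx citas k).map (fun m => (m : Int)) := by
  rw [pvBuild_get]
  cases h : pvFIdx citas k <;> simp [PySem.Dict.get?_empty]

-- main loop correspondence: A's seen-set pass over the suffix equals B's second pass
lemma pvMainLoop (citas : List (List (String × String))) :
    ∀ (l pre u dup : List (List (String × String))) (seen : PySem.Set (Option String × Option String)),
    citas = pre ++ l →
    (∀ k, k ∈ seen ↔ ∃ m, pvFIdx citas k = some m ∧ m < pre.length) →
    ((l.foldl pvStepA (u, dup, seen)).1, (l.foldl pvStepA (u, dup, seen)).2.1)
      = (PySem.List.enumerate l (pre.length : Int)).foldl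
          (pvStepB2 ((PySem.List.enumerate citas).foldl pvStepB1 PySem.Dict.empty)) (u, dup) := by
  intro l
  induction l with
  | nil => intro pre u dup seen _ _; simp [PySem.List.enumerate_nil]
  | cons c t ih =>
    intro pre u dup seen hcit H
    have hsplit : ∀ k, pvFIdx citas k = (pvFIdx pre k).or ((pvFIdx (c :: t) k).map (· + pre.length)) := by
      intro k; rw [hcit, pvFIdx_append]
    have hm : ∃ m, pvFIdx citas (pvKey c) = some m ∧ m ≤ pre.length := by
      cases hp : pvFIdx pre (pvKey c) with
      | none =>
        refine ⟨pre.length, ?_, le_refl _⟩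
        rw [hsplit, hp, pvFIdx_cons, if_pos rfl]
        simp
      | some m' =>
        exact ⟨m', by rw [hsplit, hp]; rfl, le_of_lt (pvFIdx_lt_length hp)⟩
    obtain ⟨m, hfm, hmle⟩ := hm
    have hback : ∀ k, pvFIdx citas k = some pre.length → k = pvKey c := by
      intro k hk
      rw [hsplit k] at hk
      cases hp : pvFIdx pre k with
      | some m' =>
        rw [hp] at hk
        have h1 : m' = pre.length := by simpa using hk
        have h2 := pvFIdx_lt_length hp
        omega
      | none =>
        rw [hp, Option.none_or, pvFIdx_cons] at hk
        by_cases hkc : pvKey c = k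
        · exact hkc.symm
        · rw [if_neg hkc, Option.map_map] at hk
          cases hft : pvFIdx t k with
          | none => rw [hft] at hk; simp at hk
          | some j => rw [hft] at hk; simp at hk; omega
    have hlen1 : ((pre ++ [c]).length : Int) = (pre.length : Int) + 1 := by
      have h : (pre ++ [c]).length = pre.length + 1 := by simp
      rw [h]; push_cast; ring
    rw [List.foldl_cons, PySem.List.enumerate_cons, List.foldl_cons]
    by_cases hmem : pvKey c ∈ seen
    · -- duplicate: key already seen, so first occurrence index m < pre.length
      have hlt : m < pre.length := by
        obtain ⟨m', hm', hlt'⟩ := (H _).mp hmem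
        rw [hfm] at hm'
        obtain rfl := Option.some.inj hm'
        exact hlt'
      have hA : pvStepA (u, dup, seen) c = (u, dup ++ [c], seen) := by
        simp only [pvStepA]
        rw [if_neg (not_not_intro hmem)]
      have hBc : ¬ (PySem.Dict.get? ((PySem.List.enumerate citas).foldl pvStepB1 PySem.Dict.empty) (pvKey c)
          = some ((pre.length : Nat) : Int)) := by
        rw [pvFirst_get, hfm]
        simp
        omega
      have hB : pvStepB2 ((PySem.List.enumerate citas).foldl pvStepB1 PySem.Dict.empty)
          (u, dup) (((pre.length : Nat) : Int), c) = (u, dup ++ [c]) := by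
        simp only [pvStepB2]
        rw [if_neg hBc]
      rw [hA, hB]
      have H' : ∀ k, k ∈ seen ↔ ∃ m', pvFIdx citas k = some m' ∧ m' < (pre ++ [c]).length := by
        intro k
        constructor
        · intro hk
          obtain ⟨m', h1, h2⟩ := (H k).mp hk
          exact ⟨m', h1, by simp; omega⟩
        · rintro ⟨m', h1, h2⟩
          simp only [List.length_append, List.length_cons, List.length_nil] at h2
          by_cases hm'n : m' = pre.length
          · subst hm'n
            obtain rfl := hback k h1
            exact hmem
          · exact (H k).mpr ⟨m', h1, by omega⟩
      have := ih (pre ++ [c]) u (dup ++ [c]) seen (by rw [hcit]; simp) H'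
      rw [hlen1] at this
      exact this
    · -- unique: key unseen, so its first occurrence is exactly here (m = pre.length)
      have hmn : m = pre.length := by
        by_cases hne : m < pre.length
        · exact absurd ((H _).mpr ⟨m, hfm, hne⟩) hmem
        · omega
      have hA : pvStepA (u, dup, seen) c = (u ++ [c], dup, PySem.Set.add seen (pvKey c)) := by
        simp only [pvStepA]
        rw [if_pos hmem]
      have hBc : PySem.Dict.get? ((PySem.List.enumerate citas).foldl pvStepB1 PySem.Dict.empty) (pvKey c)
          = some ((pre.length : Nat) : Int) := by
        rw [pvFirst_get, hfm, hmn]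
        simp
      have hB : pvStepB2 ((PySem.List.enumerate citas).foldl pvStepB1 PySem.Dict.empty)
          (u, dup) (((pre.length : Nat) : Int), c) = (u ++ [c], dup) := by
        simp only [pvStepB2]
        rw [if_pos hBc]
      rw [hA, hB]
      have H' : ∀ k, k ∈ PySem.Set.add seen (pvKey c) ↔
          ∃ m', pvFIdx citas k = some m' ∧ m' < (pre ++ [c]).length := by
        intro k
        rw [PySem.Set.mem_add]
        constructor
        · rintro (hk | rfl)
          · obtain ⟨m', h1, h2⟩ := (H k).mp hk
            exact ⟨m', h1, by simp; omega⟩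
          · exact ⟨m, hfm, by simp; omega⟩
        · rintro ⟨m', h1, h2⟩
          simp only [List.length_append, List.length_cons, List.length_nil] at h2
          by_cases hm'n : m' = pre.length
          · subst hm'n
            exact Or.inr (hback k h1)
          · exact Or.inl ((H k).mpr ⟨m', h1, by omega⟩)
      have := ih (pre ++ [c]) (u ++ [c]) dup (PySem.Set.add seen (pvKey c)) (by rw [hcit]; simp) H'
      rw [hlen1] at this
      exact this

-- ===== VERDICT (by name: the statement is the Claim_ definition above) =====
theorem filter_duplicate_citas_spec : Claim_equal_filter_duplicate_citas := by
  intro citas _ _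
  unfold Spec_filter_duplicate_citas filter_duplicate_citas filter_duplicate_citas_alt
  have h := pvMainLoop citas citas [] [] [] PySem.Set.empty (by simp) (by simp [PySem.Set.empty])
  simpa using h
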